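-- pv_equiv track=rewrite | github.com/jpbhatt21/integrated-mods-patcher | backend/service.py | _build_next_candidates
-- ===== SOURCE A (Python) =====
-- def _build_next_candidates(hash_list: list, current_obj: dict) -> dict:
--     """Build next version candidates for a hash."""
--     candidates = [x for x in hash_list if x["ver"] >= current_obj["ver"] and x["hash"] != current_obj["hash"]]
--     next_versions = {}
--
--     for candidate in candidates:
--         if candidate["ver"] not in next_versions:
--             next_versions[candidate["ver"]] = {}
--         if candidate["hash"] not in next_versions[candidate["ver"]]:
--             next_versions[candidate["ver"]][candidate["hash"]] = 0
--         next_versions[candidate["ver"]][candidate["hash"]] += 1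
--
--     return next_versions
-- ===== SOURCE B (Python) =====
-- def _build_next_candidates(hash_list: list, current_obj: dict) -> dict:
--     """Build next version candidates for a hash (group-by distinct keys, then count)."""
--     pairs = [(x["ver"], x["hash"]) for x in hash_list
--              if x["ver"] >= current_obj["ver"] and x["hash"] != current_obj["hash"]]
--     # distinct versions, in first-occurrence order
--     vers = []
--     for v, _ in pairs:
--         if v not in vers:
--             vers.append(v)
--     result = {}
--     for v in vers:
--         # distinct hashes of this version, in first-occurrence order
--         hashes = []
--         for v2, h in pairs:
--             if v2 == v and h not in hashes:
--                 hashes.append(h)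
--         result[v] = {h: pairs.count((v, h)) for h in hashes}
--     return result
-- ===== Notes on version B (the rewrite author's own statement) =====
-- stated objective: alternative
-- what changed: A counts by incrementing a nested dict in one pass over the candidates; B never increments: it collects the filtered (ver, hash) pairs, computes the distinct versions and per-version distinct hashes in first-occurrence order, and fills each count with pairs.count((ver, hash)).
import Mathlib
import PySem

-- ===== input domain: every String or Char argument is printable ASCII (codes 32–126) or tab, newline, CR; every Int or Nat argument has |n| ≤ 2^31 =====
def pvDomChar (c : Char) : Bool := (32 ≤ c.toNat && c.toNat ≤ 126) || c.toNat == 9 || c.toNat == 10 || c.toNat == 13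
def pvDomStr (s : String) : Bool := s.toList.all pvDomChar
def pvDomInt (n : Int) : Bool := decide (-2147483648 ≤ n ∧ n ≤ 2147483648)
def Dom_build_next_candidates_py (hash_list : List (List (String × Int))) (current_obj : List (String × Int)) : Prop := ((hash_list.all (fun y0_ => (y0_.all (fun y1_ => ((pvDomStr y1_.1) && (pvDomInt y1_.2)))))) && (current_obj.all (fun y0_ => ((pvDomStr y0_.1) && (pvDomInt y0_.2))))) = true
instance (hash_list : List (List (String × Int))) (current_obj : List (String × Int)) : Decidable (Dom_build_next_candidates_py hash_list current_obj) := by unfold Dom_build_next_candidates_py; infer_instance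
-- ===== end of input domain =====

-- B replaces A's one-pass nested in-place increment loop by a group-by: distinct versions and
-- per-version distinct hashes (first-occurrence order), each count taken with pairs.count
-- (alternative decomposition, quadratic instead of A's linear pass).


-- d[k] for a Python dict rendered as an association list; total form (default 0), exact under Pre_
def pvGet (d : List (String × Int)) (k : String) : Int := (d.lookup k).getD 0

-- ===== PORT A =====
-- one iteration of A's loop body, over the candidate's (ver, hash) pair
def stepA (n : PySem.Dict Int (PySem.Dict Int Int)) (p : Int × Int) : PySem.Dict Int (PySem.Dict Int Int) :=
  let n1 := if n.contains p.1 then n else n.insert p.1 PySem.Dict.empty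
  let inner := n1.getD p.1 PySem.Dict.empty
  let inner2 := if inner.contains p.2 then inner else inner.insert p.2 0
  n1.insert p.1 (inner2.insert p.2 (inner2.getD p.2 0 + 1))

def build_next_candidates_py (hash_list : List (List (String × Int))) (current_obj : List (String × Int)) : List (Int × List (Int × Int)) :=
  let candidates := hash_list.filter (fun x =>
    decide (pvGet current_obj "ver" ≤ pvGet x "ver") && (pvGet x "hash" != pvGet current_obj "hash"))
  let next_versions := candidates.foldl (fun n c => stepA n (pvGet c "ver", pvGet c "hash")) PySem.Dict.empty
  next_versions.items.map (fun q => (q.1, q.2.items))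

-- ===== PORT B =====
-- 'vers = []; for v, _ in pairs: if v not in vers: vers.append(v)'
def versOf (pairs : List (Int × Int)) : List Int :=
  pairs.foldl (fun vers p => PySem.Set.add vers p.1) []

-- 'hashes = []; for v2, h in pairs: if v2 == v and h not in hashes: hashes.append(h)'
def hashesOf (pairs : List (Int × Int)) (v : Int) : List Int :=
  pairs.foldl (fun hs p => if p.1 == v then PySem.Set.add hs p.2 else hs) []

-- '{h: pairs.count((v, h)) for h in hashes}'
def innerOf (pairs : List (Int × Int)) (v : Int) : PySem.Dict Int Int :=
  (hashesOf pairs v).foldl (fun d h => d.insert h (PySem.List.count pairs (v, h))) PySem.Dict.empty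

def build_next_candidates_py_alt (hash_list : List (List (String × Int))) (current_obj : List (String × Int)) : List (Int × List (Int × Int)) :=
  let pairs := (hash_list.filter (fun x =>
    decide (pvGet current_obj "ver" ≤ pvGet x "ver") && (pvGet x "hash" != pvGet current_obj "hash"))).map
      (fun x => (pvGet x "ver", pvGet x "hash"))
  let result := (versOf pairs).foldl (fun r v => r.insert v (innerOf pairs v)) PySem.Dict.empty
  result.items.map (fun q => (q.1, q.2.items))

-- ===== PRECONDITION & SPEC =====
-- Pre_ excludes exactly the inputs on which the Python raises KeyError (a missing "ver"/"hash"
-- key that the loop actually reaches); both A and B raise there.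
def Pre_build_next_candidates_py (hash_list : List (List (String × Int))) (current_obj : List (String × Int)) : Prop :=
  ∀ x ∈ hash_list, (x.lookup "ver").isSome = true ∧ (current_obj.lookup "ver").isSome = true ∧
    (pvGet current_obj "ver" ≤ pvGet x "ver" →
      (x.lookup "hash").isSome = true ∧ (current_obj.lookup "hash").isSome = true)
instance (hash_list : List (List (String × Int))) (current_obj : List (String × Int)) : Decidable (Pre_build_next_candidates_py hash_list current_obj) := by unfold Pre_build_next_candidates_py; infer_instance

def pvWitness_build_next_candidates_py : (List (List (String × Int))) × (List (String × Int)) :=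
  ([[("ver", 1), ("hash", 2)], [("ver", 1), ("hash", 2)], [("ver", 2), ("hash", 3)]], [("ver", 0), ("hash", 7)])

def Spec_build_next_candidates_py (hash_list : List (List (String × Int))) (current_obj : List (String × Int)) (out : List (Int × List (Int × Int))) : Prop := out = build_next_candidates_py_alt hash_list current_obj
instance (hash_list : List (List (String × Int))) (current_obj : List (String × Int)) (out : List (Int × List (Int × Int))) : Decidable (Spec_build_next_candidates_py hash_list current_obj out) := by unfold Spec_build_next_candidates_py; infer_instance

-- ===== CLAIM (what is proved, stated in full; the proofs are below) =====
def Claim_equal_build_next_candidates_py : Prop := ∀ (hash_list : List (List (String × Int))) (current_obj : List (String × Int)), Dom_build_next_candidates_py hash_list current_obj → Pre_build_next_candidates_py hash_list current_obj → Spec_build_next_candidates_py hash_list current_obj (build_next_candidates_py hash_list current_obj)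

-- ===== LEMMAS AND PROOFS =====

-- the nested dict rendered as the output list
def repD (n : PySem.Dict Int (PySem.Dict Int Int)) : List (Int × List (Int × Int)) :=
  n.items.map (fun q => (q.1, q.2.items))

-- the common group-by value both sides are proved equal to
def hsetG (ps : List (Int × Int)) (v : Int) : List Int :=
  PySem.Set.ofList ((ps.filter (fun p => p.1 == v)).map Prod.snd)

def innerG (ps : List (Int × Int)) (v : Int) : List (Int × Int) :=
  (hsetG ps v).map (fun h => (h, PySem.List.count ps (v, h)))

def G (ps : List (Int × Int)) : List (Int × List (Int × Int)) :=
  (PySem.Set.ofList (ps.map Prod.fst)).map (fun v => (v, innerG ps v))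

theorem versOf_eq (pairs : List (Int × Int)) : versOf pairs = PySem.Set.ofList (pairs.map Prod.fst) := by
  rw [versOf, ← PySem.Set.update_map_eq_foldl_add, PySem.Set.update_nil_left]

theorem hashesOf_eq (pairs : List (Int × Int)) (v : Int) : hashesOf pairs v = hsetG pairs v := by
  rw [hashesOf, hsetG, PySem.List.foldl_if_eq_foldl_filter, ← PySem.Set.update_map_eq_foldl_add,
    PySem.Set.update_nil_left]

-- a foldl of inserts at distinct fresh keys, from the empty dict, lists exactly those entries
theorem items_foldl_insert_id {ν : Type} (l : List Int) (F : Int → ν) (hnd : l.Nodup) :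
    (l.foldl (fun (r : PySem.Dict Int ν) v => r.insert v (F v)) PySem.Dict.empty).items
      = l.map (fun v => (v, F v)) := by
  have h := PySem.Dict.items_foldl_insert_fresh (l := l) (k := fun (a : Int) => a) (v := F)
    (d := PySem.Dict.empty) (fun a _ => PySem.Dict.contains_empty a) (by simpa using hnd)
  simpa using h

theorem innerOf_items (pairs : List (Int × Int)) (v : Int) : (innerOf pairs v).items = innerG pairs v := by
  rw [innerOf, innerG, hashesOf_eq]
  exact items_foldl_insert_id _ _ (PySem.Set.nodup_ofList _)

theorem alt_eq_G (pairs : List (Int × Int)) :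
    ((versOf pairs).foldl (fun r v => r.insert v (innerOf pairs v)) PySem.Dict.empty).items.map
      (fun q => (q.1, q.2.items)) = G pairs := by
  have hnd : (versOf pairs).Nodup := by rw [versOf_eq]; exact PySem.Set.nodup_ofList _
  rw [items_foldl_insert_id _ _ hnd, List.map_map, G, versOf_eq]
  simp [Function.comp, innerOf_items]

theorem count_snoc (ps : List (Int × Int)) (p q : Int × Int) :
    PySem.List.count (ps ++ [p]) q = PySem.List.count ps q + (if q = p then 1 else 0) := by
  by_cases he : q = p
  · subst he; simp [PySem.List.count_eq, List.count_append]
  · simp [PySem.List.count_eq, List.count_append, he, Ne.symm he]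

theorem innerG_append_ne (ps : List (Int × Int)) (p : Int × Int) (v : Int) (hne : p.1 ≠ v) :
    innerG (ps ++ [p]) v = innerG ps v := by
  have hf : (ps ++ [p]).filter (fun q => q.1 == v) = ps.filter (fun q => q.1 == v) := by
    rw [List.filter_append]
    have : (p.1 == v) = false := by simpa using hne
    simp [List.filter, this]
  rw [innerG, innerG, hsetG, hsetG, hf]
  apply List.map_congr_left
  intro h _
  have hne2 : (v, h) ≠ p := by intro e; exact hne (by rw [← e])
  rw [count_snoc, if_neg hne2]
  simp

theorem step_main (ps : List (Int × Int)) (n : PySem.Dict Int (PySem.Dict Int Int))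
    (hrep : repD n = G ps) (v h : Int) :
    repD (stepA n (v, h)) = G (ps ++ [(v, h)]) := by
  have hkeys : n.keys = PySem.Set.ofList (ps.map Prod.fst) := by
    have h1 := congrArg (List.map Prod.fst) hrep
    simp only [repD, G, List.map_map, Function.comp_def, List.map_id'] at h1
    simpa [PySem.Dict.keys] using h1
  have hndk : n.keys.Nodup := by rw [hkeys]; exact PySem.Set.nodup_ofList _
  by_cases hv : v ∈ ps.map Prod.fst
  · -- version already present
    have hcont : n.contains v = true := by
      rw [PySem.Dict.contains_eq_decide_mem_keys, hkeys]
      simp [PySem.Set.mem_ofList, hv]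
    obtain ⟨q, hqmem, hq1, hq2⟩ : ∃ q ∈ n.items, q.1 = v ∧ q.2.items = innerG ps v := by
      have hmem : (v, innerG ps v) ∈ G ps := by
        rw [G]
        exact List.mem_map.2 ⟨v, (PySem.Set.mem_ofList _ _).2 hv, rfl⟩
      rw [← hrep, repD] at hmem
      obtain ⟨q, hq, he⟩ := List.mem_map.1 hmem
      exact ⟨q, hq, congrArg Prod.fst he, congrArg Prod.snd he⟩
    have hgd : n.getD v PySem.Dict.empty = q.2 := by
      have hm : (v, q.2) ∈ n.items := by rw [← hq1]; exact hqmem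
      exact PySem.Dict.getD_of_mem_items _ hm hndk _
    have hikeys : q.2.keys = hsetG ps v := by
      have h2 := congrArg (List.map Prod.fst) hq2
      simp only [innerG, List.map_map, Function.comp_def, List.map_id'] at h2
      simpa [PySem.Dict.keys] using h2
    have hind : q.2.keys.Nodup := by rw [hikeys, hsetG]; exact PySem.Set.nodup_ofList _
    have hvers : PySem.Set.ofList ((ps ++ [(v, h)]).map Prod.fst)
        = PySem.Set.ofList (ps.map Prod.fst) := by
      have hm : (ps ++ [(v, h)]).map Prod.fst = ps.map Prod.fst ++ [v] := by simp
      rw [hm, PySem.Set.ofList_append_singleton]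
      exact PySem.Set.add_of_mem ((PySem.Set.mem_ofList _ _).2 hv)
    -- NEW : the updated inner dict; its items are the updated group-by row
    have key : ∀ NEW : PySem.Dict Int Int, NEW.items = innerG (ps ++ [(v, h)]) v →
        repD (n.insert v NEW) = G (ps ++ [(v, h)]) := by
      intro NEW hNEW
      rw [repD, PySem.Dict.items_insert_of_contains _ _ hcont, List.map_map]
      have hL : n.items.map ((fun r : Int × PySem.Dict Int Int => (r.1, r.2.items)) ∘
            (fun r => if r.1 == v then (v, NEW) else r))
          = (repD n).map (fun e => if e.1 == v then (v, NEW.items) else e) := by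
        rw [repD, List.map_map]
        apply List.map_congr_left
        intro r _
        by_cases hr : r.1 = v <;> simp [Function.comp, hr]
      rw [hL, hrep, G, List.map_map, G, hvers]
      apply List.map_congr_left
      intro v2 hv2
      by_cases hvv : v2 = v
      · subst hvv; simp [Function.comp, hNEW]
      · have : (v2 == v) = false := by simpa using hvv
        simp only [Function.comp, this, Bool.false_eq_true, if_false]
        rw [innerG_append_ne ps (v, h) v2 (fun e => hvv e.symm)]
    by_cases hh : h ∈ hsetG ps v
    · -- hash already present under this version: in-place increment
      have hic : q.2.contains h = true := by
        rw [PySem.Dict.contains_eq_decide_mem_keys, hikeys]; simp [hh]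
      have higd : q.2.getD h 0 = (PySem.List.count ps (v, h) : Int) := by
        have hm : (h, (PySem.List.count ps (v, h) : Int)) ∈ q.2.items := by
          rw [hq2, innerG]
          exact List.mem_map.2 ⟨h, hh, rfl⟩
        exact PySem.Dict.getD_of_mem_items _ hm hind _
      have hres : stepA n (v, h)
          = n.insert v (q.2.insert h ((PySem.List.count ps (v, h) : Int) + 1)) := by
        simp only [stepA, hcont, if_true, hgd, hic, higd]
      rw [hres]
      apply key
      rw [PySem.Dict.items_insert_of_contains _ _ hic, hq2, innerG, innerG, List.map_map]
      have hset' : hsetG (ps ++ [(v, h)]) v = hsetG ps v := by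
        rw [hsetG, hsetG, List.filter_append]
        simp only [List.filter, BEq.rfl, List.map_append, List.map_cons, List.map_nil]
        rw [PySem.Set.ofList_append_singleton]
        exact PySem.Set.add_of_mem hh
      rw [hset']
      apply List.map_congr_left
      intro h2 _
      by_cases hhh : h2 = h
      · subst hhh
        rw [count_snoc, if_pos rfl]
        simp [Function.comp]
      · have hb : (h2 == h) = false := by simpa using hhh
        have hne2 : (v, h2) ≠ (v, h) := by simp [hhh]
        rw [count_snoc, if_neg hne2]
        simp [Function.comp, hb]
    · -- new hash under this version: appended with count 1
      have hic : q.2.contains h = false := by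
        rw [PySem.Dict.contains_eq_decide_mem_keys, hikeys]; simp [hh]
      have hcnt0 : PySem.List.count ps (v, h) = 0 := by
        rw [PySem.List.count_eq, List.count_eq_zero]
        intro hm
        exact hh ((PySem.Set.mem_ofList _ _).2
          (List.mem_map.2 ⟨(v, h), List.mem_filter.2 ⟨hm, by simp⟩, rfl⟩))
      have hres : stepA n (v, h) = n.insert v (q.2.insert h 1) := by
        simp only [stepA, hcont, if_true, hgd, hic, Bool.false_eq_true, if_false]
        rw [PySem.Dict.getD_insert_self, PySem.Dict.insert_insert_self]
        norm_num
      rw [hres]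
      apply key
      rw [PySem.Dict.items_insert_of_not_contains _ _ hic, hq2, innerG, innerG]
      have hset' : hsetG (ps ++ [(v, h)]) v = hsetG ps v ++ [h] := by
        rw [hsetG, hsetG, List.filter_append]
        simp only [List.filter, BEq.rfl, List.map_append, List.map_cons, List.map_nil]
        rw [PySem.Set.ofList_append_singleton]
        exact PySem.Set.add_of_not_mem hh
      rw [hset', List.map_append]
      congr 1
      · apply List.map_congr_left
        intro h2 hh2
        have hne2 : (v, h2) ≠ (v, h) := by
          simp only [ne_eq, Prod.mk.injEq, true_and]
          intro e; exact hh (e ▸ hh2)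
        rw [count_snoc, if_neg hne2]
        simp
      · simp only [List.map_cons, List.map_nil]
        rw [count_snoc, if_pos rfl, hcnt0]
        simp
  · -- brand-new version: appended entry with a single hash of count 1
    have hcont : n.contains v = false := by
      rw [PySem.Dict.contains_eq_decide_mem_keys, hkeys]
      simp [PySem.Set.mem_ofList, hv]
    have hres : stepA n (v, h) = n.insert v (PySem.Dict.empty.insert h 1) := by
      simp only [stepA, hcont, Bool.false_eq_true, if_false]
      rw [PySem.Dict.getD_insert_self]
      simp only [PySem.Dict.contains_empty, Bool.false_eq_true, if_false]
      rw [PySem.Dict.getD_insert_self, PySem.Dict.insert_insert_self,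
        PySem.Dict.insert_insert_self]
      norm_num
    have hone : (PySem.Dict.empty.insert h (1 : Int)).items = [(h, 1)] := by
      rw [PySem.Dict.items_insert_of_not_contains _ _ (PySem.Dict.contains_empty h)]
      rfl
    have hvers : PySem.Set.ofList ((ps ++ [(v, h)]).map Prod.fst)
        = PySem.Set.ofList (ps.map Prod.fst) ++ [v] := by
      have hm : (ps ++ [(v, h)]).map Prod.fst = ps.map Prod.fst ++ [v] := by simp
      rw [hm, PySem.Set.ofList_append_singleton]
      exact PySem.Set.add_of_not_mem (fun hm2 => hv ((PySem.Set.mem_ofList _ _).1 hm2))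
    rw [hres, repD, PySem.Dict.items_insert_of_not_contains _ _ hcont, List.map_append,
      G, hvers, List.map_append]
    congr 1
    · rw [← repD, hrep, G]
      apply List.map_congr_left
      intro v2 hv2
      have hvv : v ≠ v2 := by
        intro e; exact hv (e ▸ (PySem.Set.mem_ofList _ _).1 hv2)
      rw [innerG_append_ne ps (v, h) v2 hvv]
    · have hfil : ps.filter (fun r => r.1 == v) = [] := by
        rw [List.filter_eq_nil_iff]
        intro r hr hb
        exact hv (List.mem_map.2 ⟨r, hr, by simpa using hb⟩)
      have hcnt0 : PySem.List.count ps (v, h) = 0 := by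
        rw [PySem.List.count_eq, List.count_eq_zero]
        intro hm
        exact hv (List.mem_map.2 ⟨(v, h), hm, rfl⟩)
      simp only [List.map_cons, List.map_nil, hone]
      rw [innerG]
      have hset' : hsetG (ps ++ [(v, h)]) v = [h] := by
        rw [hsetG, List.filter_append, hfil]
        simp only [List.nil_append, List.filter, BEq.rfl, List.map_cons, List.map_nil]
        rfl
      rw [hset']
      simp only [List.map_cons, List.map_nil]
      rw [count_snoc, if_pos rfl, hcnt0]
      simp

theorem foldA_eq_G (ps : List (Int × Int)) :
    repD (ps.foldl stepA PySem.Dict.empty) = G ps := by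
  induction ps using List.reverseRecOn with
  | nil => rfl
  | append_singleton ps p ih =>
    rw [List.foldl_append, List.foldl_cons, List.foldl_nil]
    exact step_main ps _ ih p.1 p.2

-- ===== VERDICT (by name: the statement is the Claim_ definition above) =====
theorem build_next_candidates_py_spec : Claim_equal_build_next_candidates_py := by
  intro hash_list current_obj _ _
  unfold Spec_build_next_candidates_py build_next_candidates_py build_next_candidates_py_alt
  simp only []
  rw [alt_eq_G, ← foldA_eq_G, repD, List.foldl_map]
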